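-- pv_equiv track=rewrite | github.com/apillacag/ComplejidadAlgoritmicaTB2 | ProyectoSJL/compat.py | convertir_a_diccionario_pesos
-- ===== SOURCE A (Python) =====
-- def convertir_a_diccionario_pesos(lista_ady):
--     """
--     Convierte lista_ady a dict-of-dicts {u: {v: peso, ...}, ...}
--     usado por MSTPrim / MSTKruskal adaptadas al estilo del profesor.
--     Peso = distancia (metros).
--     """
--     out = {}
--     for u, vecinos in lista_ady.items():
--         if u not in out:
--             out[u] = {}
--         for v, d, t in vecinos:
--             # si ya existe, conservar el menor
--             if v not in out[u] or d < out[u][v]: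
--                 out[u][v] = d
--     return out
-- ===== SOURCE B (Python) =====
-- def convertir_a_diccionario_pesos(lista_ady):
--     """Group-then-reduce: collect all weights per (u, v) in one grouping pass,
--     then take min of each group, instead of a scan with a min-compare update."""
--     out = {}
--     for u, vecinos in lista_ady.items():
--         groups = {}
--         for v, w, _t in vecinos:
--             groups[v] = groups.get(v, []) + [w]
--         out[u] = {v: min(ws) for v, ws in groups.items()}
--     return out
-- ===== Notes on version B (the rewrite author's own statement) =====
-- stated objective: alternative
-- what changed: Replaces A's scan-with-min-compare ('if v not in out[u] or d < out[u][v]') by a group-then-reduce pass: one grouping loop collects all weights per neighbour, then a dict comprehension takes min() of each group.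
import Mathlib
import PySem

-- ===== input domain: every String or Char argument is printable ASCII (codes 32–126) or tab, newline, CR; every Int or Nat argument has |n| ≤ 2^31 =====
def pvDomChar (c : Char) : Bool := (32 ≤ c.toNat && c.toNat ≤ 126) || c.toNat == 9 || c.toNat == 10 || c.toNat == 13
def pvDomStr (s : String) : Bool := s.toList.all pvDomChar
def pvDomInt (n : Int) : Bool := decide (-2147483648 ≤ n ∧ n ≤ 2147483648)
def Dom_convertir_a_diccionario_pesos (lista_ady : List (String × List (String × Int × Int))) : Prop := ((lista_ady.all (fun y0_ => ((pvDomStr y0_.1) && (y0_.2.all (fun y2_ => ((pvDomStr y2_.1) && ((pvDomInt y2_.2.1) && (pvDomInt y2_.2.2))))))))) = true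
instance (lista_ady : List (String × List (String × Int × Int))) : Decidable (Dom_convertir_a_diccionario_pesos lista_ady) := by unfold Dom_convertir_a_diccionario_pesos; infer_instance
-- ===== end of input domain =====

-- B replaces A's scan-with-min-compare by a group-then-reduce pass (collect all weights per
-- neighbour, then take the min of each group); objective: alternative decomposition, same cost.

-- ===== PORT A =====
def convertir_a_diccionario_pesos (lista_ady : List (String × List (String × Int × Int))) : List (String × List (String × Int)) :=
  ((lista_ady.foldl
      (fun (out : PySem.Dict String (PySem.Dict String Int)) p =>
        -- if u not in out: out[u] = {}
        let out := if out.contains p.1 then out else out.insert p.1 PySem.Dict.empty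
        -- for v, d, t in vecinos: if v not in out[u] or d < out[u][v]: out[u][v] = d
        p.2.foldl
          (fun out e =>
            match (out.getD p.1 PySem.Dict.empty).get? e.1 with
            | none => out.insert p.1 ((out.getD p.1 PySem.Dict.empty).insert e.1 e.2.1)
            | some c =>
                if e.2.1 < c then out.insert p.1 ((out.getD p.1 PySem.Dict.empty).insert e.1 e.2.1)
                else out)
          out)
      PySem.Dict.empty).items).map (fun q => (q.1, q.2.items))

-- ===== PORT B =====
-- port of Python min(ws); B only calls it on nonempty lists (the [] case is unreachable there)
def pvMin (ws : List Int) : Int :=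
  match ws with
  | [] => 0
  | h :: t => t.foldl min h

def convertir_a_diccionario_pesos_alt (lista_ady : List (String × List (String × Int × Int))) : List (String × List (String × Int)) :=
  ((lista_ady.foldl
      (fun (out : PySem.Dict String (PySem.Dict String Int)) p =>
        -- groups[v] = groups.get(v, []) + [w]
        let groups := p.2.foldl
          (fun (g : PySem.Dict String (List Int)) e => g.insert e.1 (g.getD e.1 [] ++ [e.2.1]))
          PySem.Dict.empty
        -- out[u] = {v: min(ws) for v, ws in groups.items()}
        out.insert p.1 (PySem.Dict.mk (groups.items.map (fun q => (q.1, pvMin q.2)))))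
      PySem.Dict.empty).items).map (fun q => (q.1, q.2.items))

-- ===== PRECONDITION & SPEC =====
-- Pre_ excludes association lists with duplicate top-level keys: the Python A receives a dict,
-- in which duplicate keys cannot exist, so no input A runs on is excluded.
def Pre_convertir_a_diccionario_pesos (lista_ady : List (String × List (String × Int × Int))) : Prop :=
  (lista_ady.map Prod.fst).Nodup
instance (lista_ady : List (String × List (String × Int × Int))) : Decidable (Pre_convertir_a_diccionario_pesos lista_ady) := by unfold Pre_convertir_a_diccionario_pesos; infer_instance

def pvWitness_convertir_a_diccionario_pesos : (List (String × List (String × Int × Int))) :=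
  [("a", [("b", 3, 1), ("b", 2, 5), ("c", 4, 0)]), ("d", [])]

def Spec_convertir_a_diccionario_pesos (lista_ady : List (String × List (String × Int × Int))) (out : List (String × List (String × Int))) : Prop := out = convertir_a_diccionario_pesos_alt lista_ady
instance (lista_ady : List (String × List (String × Int × Int))) (out : List (String × List (String × Int))) : Decidable (Spec_convertir_a_diccionario_pesos lista_ady out) := by unfold Spec_convertir_a_diccionario_pesos; infer_instance

-- ===== CLAIM (what is proved, stated in full; the proofs are below) =====
def Claim_equal_convertir_a_diccionario_pesos : Prop := ∀ (lista_ady : List (String × List (String × Int × Int))), Dom_convertir_a_diccionario_pesos lista_ady → Pre_convertir_a_diccionario_pesos lista_ady → Spec_convertir_a_diccionario_pesos lista_ady (convertir_a_diccionario_pesos lista_ady)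

-- ===== LEMMAS AND PROOFS =====

-- A's inner loop, abstracted to act on the inner dict alone
def pvInnerA (d : PySem.Dict String Int) (es : List (String × Int × Int)) : PySem.Dict String Int :=
  es.foldl
    (fun d e =>
      match d.get? e.1 with
      | none => d.insert e.1 e.2.1
      | some c => if e.2.1 < c then d.insert e.1 e.2.1 else d)
    d

-- B's grouping loop, abstracted
def pvInnerG (g : PySem.Dict String (List Int)) (es : List (String × Int × Int)) : PySem.Dict String (List Int) :=
  es.foldl (fun g e => g.insert e.1 (g.getD e.1 [] ++ [e.2.1])) g

lemma pvMin_append (ws : List Int) (w : Int) (h : ws ≠ []) :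
    pvMin (ws ++ [w]) = min (pvMin ws) w := by
  cases ws with
  | nil => exact absurd rfl h
  | cons a t => simp [pvMin, List.foldl_append]

lemma pvMapMin_get? (l : List (String × List Int)) (v : String) :
    (PySem.Dict.mk (l.map (fun q => (q.1, pvMin q.2)))).get? v
      = ((PySem.Dict.mk l).get? v).map pvMin := by
  induction l with
  | nil => rfl
  | cons p t ih =>
      rw [List.map_cons, PySem.Dict.get?_mk_cons, PySem.Dict.get?_mk_cons]
      by_cases h : p.1 == v
      · simp [h]
      · simp [h, ih]

-- A's inner loop unfolds one step (definitional)
lemma pvInnerA_cons (D : PySem.Dict String Int) (e : String × Int × Int) (t : List (String × Int × Int)) :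
    pvInnerA D (e :: t)
      = pvInnerA
          (match D.get? e.1 with
           | none => D.insert e.1 e.2.1
           | some c => if e.2.1 < c then D.insert e.1 e.2.1 else D) t := rfl

-- A's inner loop, run inside the outer dict at a key just written, only rewrites that key
lemma pvStepA (es : List (String × Int × Int)) :
    ∀ (out : PySem.Dict String (PySem.Dict String Int)) (u : String) (D : PySem.Dict String Int),
    es.foldl
      (fun out e =>
        match (out.getD u PySem.Dict.empty).get? e.1 with
        | none => out.insert u ((out.getD u PySem.Dict.empty).insert e.1 e.2.1)
        | some c =>
            if e.2.1 < c then out.insert u ((out.getD u PySem.Dict.empty).insert e.1 e.2.1)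
            else out)
      (out.insert u D)
    = out.insert u (pvInnerA D es) := by
  induction es with
  | nil => intro out u D; rfl
  | cons e t ih =>
      intro out u D
      rw [List.foldl_cons, pvInnerA_cons, PySem.Dict.getD_insert_self]
      cases h : D.get? e.1 with
      | none =>
          rw [PySem.Dict.insert_insert_self]
          exact ih out u _
      | some c =>
          by_cases hlt : e.2.1 < c
          · simp only [if_pos hlt]
            rw [PySem.Dict.insert_insert_self]
            exact ih out u _
          · simp only [if_neg hlt]
            exact ih out u _

-- grouping loop unfolds one step (definitional)
lemma pvInnerG_cons (g : PySem.Dict String (List Int)) (e : String × Int × Int) (t : List (String × Int × Int)) :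
    pvInnerG g (e :: t) = pvInnerG (g.insert e.1 (g.getD e.1 [] ++ [e.2.1])) t := rfl

-- core bisimulation: the min-scan dict is the pointwise min of the grouping dict
lemma pvInner_eq (es : List (String × Int × Int)) :
    ∀ (g : PySem.Dict String (List Int)),
    g.keys.Nodup →
    (∀ p ∈ g.items, p.2 ≠ ([] : List Int)) →
    pvInnerA (PySem.Dict.mk (g.items.map (fun q => (q.1, pvMin q.2)))) es
      = PySem.Dict.mk ((pvInnerG g es).items.map (fun q => (q.1, pvMin q.2))) := by
  induction es with
  | nil => intro g _ _; rfl
  | cons e t ih =>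
      intro g hnd hne
      have heta : PySem.Dict.mk g.items = g := rfl
      have hget : (PySem.Dict.mk (g.items.map (fun q => (q.1, pvMin q.2)))).get? e.1
          = (g.get? e.1).map pvMin := by rw [pvMapMin_get?, heta]
      rw [pvInnerA_cons, pvInnerG_cons]
      cases h : g.get? e.1 with
      | none =>
          have hd0 : (PySem.Dict.mk (g.items.map (fun q => (q.1, pvMin q.2)))).get? e.1 = none := by
            rw [hget, h]; rfl
          have hcg : g.contains e.1 = false := by
            rw [PySem.Dict.contains_eq_isSome_get?, h]; rfl
          have hcd : (PySem.Dict.mk (g.items.map (fun q => (q.1, pvMin q.2)))).contains e.1 = false := by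
            rw [PySem.Dict.contains_eq_isSome_get?, hd0]; rfl
          have hgd : g.getD e.1 [] = [] := by rw [PySem.Dict.getD_eq_get?_getD, h]; rfl
          simp only [hd0, hgd, List.nil_append]
          have hmk : (PySem.Dict.mk (g.items.map (fun q => (q.1, pvMin q.2)))).insert e.1 e.2.1
              = PySem.Dict.mk ((g.insert e.1 [e.2.1]).items.map (fun q => (q.1, pvMin q.2))) := by
            apply PySem.Dict.ext
            rw [PySem.Dict.items_insert_of_not_contains _ _ hcd,
                PySem.Dict.items_insert_of_not_contains _ _ hcg, List.map_append]
            rfl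
          rw [hmk]
          apply ih
          · exact PySem.Dict.nodup_keys_insert _ _ _ hnd
          · intro q hq
            rcases (PySem.Dict.mem_items_insert _ _ _ _).1 hq with h1 | ⟨h2, _⟩
            · rw [h1]; simp
            · exact hne q h2
      | some ws =>
          have hd0 : (PySem.Dict.mk (g.items.map (fun q => (q.1, pvMin q.2)))).get? e.1
              = some (pvMin ws) := by rw [hget, h]; rfl
          have hws : ws ≠ [] := hne (e.1, ws) (PySem.Dict.mem_items_of_get?_eq_some _ h)
          have hcg : g.contains e.1 = true := by
            rw [PySem.Dict.contains_eq_isSome_get?, h]; rfl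
          have hcd : (PySem.Dict.mk (g.items.map (fun q => (q.1, pvMin q.2)))).contains e.1 = true := by
            rw [PySem.Dict.contains_eq_isSome_get?, hd0]; rfl
          have hgd : g.getD e.1 [] = ws := by rw [PySem.Dict.getD_eq_get?_getD, h]; rfl
          have hnonempty : ∀ q ∈ (g.insert e.1 (ws ++ [e.2.1])).items, q.2 ≠ ([] : List Int) := by
            intro q hq
            rcases (PySem.Dict.mem_items_insert _ _ _ _).1 hq with h1 | ⟨h2, _⟩
            · rw [h1]; simp
            · exact hne q h2
          simp only [hd0, hgd]
          by_cases hlt : e.2.1 < pvMin ws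
          · simp only [if_pos hlt]
            have hmk : (PySem.Dict.mk (g.items.map (fun q => (q.1, pvMin q.2)))).insert e.1 e.2.1
                = PySem.Dict.mk ((g.insert e.1 (ws ++ [e.2.1])).items.map (fun q => (q.1, pvMin q.2))) := by
              apply PySem.Dict.ext
              rw [PySem.Dict.items_insert_of_contains _ _ hcd,
                  PySem.Dict.items_insert_of_contains _ _ hcg, List.map_map, List.map_map]
              apply List.map_congr_left
              intro q _
              by_cases hq1 : q.1 == e.1
              · simp only [Function.comp, hq1, if_pos]
                rw [pvMin_append ws e.2.1 hws]
                simp [min_eq_right (le_of_lt hlt)]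
              · simp [Function.comp, hq1]
            rw [hmk]
            exact ih _ (PySem.Dict.nodup_keys_insert _ _ _ hnd) hnonempty
          · simp only [if_neg hlt]
            have hmk : PySem.Dict.mk (g.items.map (fun q => (q.1, pvMin q.2)))
                = PySem.Dict.mk ((g.insert e.1 (ws ++ [e.2.1])).items.map (fun q => (q.1, pvMin q.2))) := by
              apply PySem.Dict.ext
              rw [PySem.Dict.items_insert_of_contains _ _ hcg, List.map_map]
              apply List.map_congr_left
              intro q hq
              by_cases hq1 : q.1 == e.1
              · have hq1' : q.1 = e.1 := by exact eq_of_beq hq1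
                have : g.get? q.1 = some q.2 := PySem.Dict.get?_of_mem_items _ hq hnd
                rw [hq1', h] at this
                have hq2 : q.2 = ws := by injection this.symm
                simp only [Function.comp, hq1, if_pos]
                rw [pvMin_append ws e.2.1 hws]
                have : pvMin ws ≤ e.2.1 := le_of_not_gt hlt
                rw [min_eq_left this, hq1', hq2]
              · simp [Function.comp, hq1]
            rw [hmk]
            exact ih _ (PySem.Dict.nodup_keys_insert _ _ _ hnd) hnonempty

lemma pvOuter_eq (l : List (String × List (String × Int × Int))) :
    ∀ (out : PySem.Dict String (PySem.Dict String Int)),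
    (∀ p ∈ l, out.contains p.1 = false) →
    (l.map Prod.fst).Nodup →
    l.foldl
      (fun out p =>
        let out := if out.contains p.1 then out else out.insert p.1 PySem.Dict.empty
        p.2.foldl
          (fun out e =>
            match (out.getD p.1 PySem.Dict.empty).get? e.1 with
            | none => out.insert p.1 ((out.getD p.1 PySem.Dict.empty).insert e.1 e.2.1)
            | some c =>
                if e.2.1 < c then out.insert p.1 ((out.getD p.1 PySem.Dict.empty).insert e.1 e.2.1)
                else out)
          out)
      out
    = l.foldl
      (fun out p =>
        let groups := p.2.foldl
          (fun (g : PySem.Dict String (List Int)) e => g.insert e.1 (g.getD e.1 [] ++ [e.2.1]))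
          PySem.Dict.empty
        out.insert p.1 (PySem.Dict.mk (groups.items.map (fun q => (q.1, pvMin q.2)))))
      out := by
  induction l with
  | nil => intro out _ _; rfl
  | cons p t ih =>
      intro out hfresh hnd
      rw [List.foldl_cons, List.foldl_cons]
      have hc : out.contains p.1 = false := hfresh p (by simp)
      simp only [hc, Bool.false_eq_true, if_false]
      rw [pvStepA]
      have hinner : pvInnerA PySem.Dict.empty p.2
          = PySem.Dict.mk ((pvInnerG PySem.Dict.empty p.2).items.map (fun q => (q.1, pvMin q.2))) := by
        have := pvInner_eq p.2 PySem.Dict.empty (by simp [PySem.Dict.empty, PySem.Dict.keys]) (by simp [PySem.Dict.empty])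
        simpa using this
      rw [hinner]
      apply ih
      · intro q hq
        have hq1 : q.1 ≠ p.1 := by
          intro hbad
          have : p.1 ∈ t.map Prod.fst := hbad ▸ List.mem_map_of_mem hq
          exact (List.nodup_cons.1 hnd).1 this
        rw [PySem.Dict.contains_insert]
        simp [hq1, hfresh q (List.mem_cons_of_mem p hq)]
      · exact (List.nodup_cons.1 hnd).2

-- ===== VERDICT (by name: the statement is the Claim_ definition above) =====
theorem convertir_a_diccionario_pesos_spec : Claim_equal_convertir_a_diccionario_pesos := by
  intro lista_ady _ hpre
  unfold Spec_convertir_a_diccionario_pesos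
  unfold convertir_a_diccionario_pesos convertir_a_diccionario_pesos_alt
  rw [pvOuter_eq lista_ady PySem.Dict.empty (fun p _ => PySem.Dict.contains_empty p.1) hpre]
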